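-- pv_equiv track=rewrite | github.com/UN-GCPDS/Dashboard_CHEC | utils/maps_functions.py | enumerate_repeated_from_startup
-- ===== SOURCE A (Python) =====
-- def enumerate_repeated_from_startup(lista):
--     # Diccionario para contar ocurrencias totales
--     conteo_total = {}
--     for elemento in lista:
--         conteo_total[elemento] = conteo_total.get(elemento, 0) + 1
--
--     # Diccionario para seguir el conteo actual
--     conteo_actual = {}
--     resultado = []
--
--     for elemento in lista:
--         if conteo_total[elemento] > 1:
--             # Si el elemento aparece más de una vez
--             conteo_actual[elemento] = conteo_actual.get(elemento, 0) + 1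
--             resultado.append(f"{elemento}-{conteo_actual[elemento]}")
--         else:
--             # Si el elemento aparece solo una vez
--             resultado.append(elemento)
--
--     return resultado
-- ===== SOURCE B (Python) =====
-- def enumerate_repeated_from_startup(lista):
--     # Build an index table: element -> list of positions (encounter order),
--     # then scatter suffixed names over a copy of the input.
--     positions = {}
--     for i, e in enumerate(lista):
--         positions.setdefault(e, []).append(i)
--     res = list(lista)
--     for e, idxs in positions.items():
--         if len(idxs) > 1:
--             for k, i in enumerate(idxs):
--                 res[i] = f"{e}-{k + 1}"
--     return res
-- ===== Notes on version B (the rewrite author's own statement) =====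
-- stated objective: alternative
-- what changed: Replaces A's two sequential dict-counting passes (total counts, then running counts with ordered appends) by building one element->positions index table and scattering the suffixed names by index over a copy of the input list.
import Mathlib
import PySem

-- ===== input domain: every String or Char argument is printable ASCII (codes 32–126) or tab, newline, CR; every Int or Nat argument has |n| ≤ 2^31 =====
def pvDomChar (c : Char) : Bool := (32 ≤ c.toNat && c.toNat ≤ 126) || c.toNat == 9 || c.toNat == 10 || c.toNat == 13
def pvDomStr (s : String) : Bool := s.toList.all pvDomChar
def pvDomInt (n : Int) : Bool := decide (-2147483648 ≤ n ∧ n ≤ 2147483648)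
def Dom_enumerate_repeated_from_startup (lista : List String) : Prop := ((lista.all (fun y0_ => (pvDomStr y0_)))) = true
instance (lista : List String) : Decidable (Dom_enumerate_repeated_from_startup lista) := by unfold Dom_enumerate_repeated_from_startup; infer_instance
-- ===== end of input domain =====

-- B replaces A's two sequential counting passes by an element→positions index table
-- plus an index-based scatter over a copy of the input (alternative decomposition, same cost).

-- ===== PORT A =====
def enumerate_repeated_from_startup (lista : List String) : List String :=
  -- conteo_total[e] = conteo_total.get(e, 0) + 1
  let conteo_total : PySem.Dict String Int :=
    lista.foldl (fun d e => d.insert e (d.getD e 0 + 1)) PySem.Dict.empty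
  -- second loop over lista carrying (conteo_actual, resultado);
  -- conteo_total[elemento] ported as getD (every element of lista is a key)
  (lista.foldl
    (fun (st : PySem.Dict String Int × List String) elemento =>
      if conteo_total.getD elemento 0 > 1 then
        let ca := st.1.insert elemento (st.1.getD elemento 0 + 1)
        (ca, st.2 ++ [elemento ++ "-" ++ PySem.Int.toStr (ca.getD elemento 0)])
      else
        (st.1, st.2 ++ [elemento]))
    (PySem.Dict.empty, ([] : List String))).2

-- ===== PORT B =====
def enumerate_repeated_from_startup_alt (lista : List String) : List String :=
  -- positions.setdefault(e, []).append(i)  ==  modify e [] (· ++ [i])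
  let positions : PySem.Dict String (List Int) :=
    (PySem.List.enumerate lista 0).foldl
      (fun d p => d.modify p.2 [] (fun l => l ++ [p.1])) PySem.Dict.empty
  -- res = list(lista), then scatter the suffixed names by index; res[i] = … is pySetD
  positions.items.foldl
    (fun res p =>
      if p.2.length > 1 then
        (PySem.List.enumerate p.2 0).foldl
          (fun res q => PySem.List.pySetD res q.2 (p.1 ++ "-" ++ PySem.Int.toStr (q.1 + 1))) res
      else res)
    lista

-- ===== PRECONDITION & SPEC =====
def Spec_enumerate_repeated_from_startup (lista : List String) (out : List String) : Prop := out = enumerate_repeated_from_startup_alt lista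
instance (lista : List String) (out : List String) : Decidable (Spec_enumerate_repeated_from_startup lista out) := by unfold Spec_enumerate_repeated_from_startup; infer_instance

-- ===== CLAIM (what is proved, stated in full; the proofs are below) =====
def Claim_equal_enumerate_repeated_from_startup : Prop := ∀ (lista : List String), Dom_enumerate_repeated_from_startup lista → Spec_enumerate_repeated_from_startup lista (enumerate_repeated_from_startup lista)

-- ===== LEMMAS AND PROOFS =====

-- occurrence positions of e in xs, numbered from s (the value the index table stores)
def occ : List String → Int → String → List Int
  | [], _, _ => []
  | x :: xs, s, e => (if x == e then [s] else []) ++ occ xs (s + 1) e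

theorem occ_bounds (xs : List String) (s : Int) (e : String) :
    ∀ i ∈ occ xs s e, s ≤ i ∧ i < s + xs.length := by
  induction xs generalizing s with
  | nil => simp [occ]
  | cons x xs ih =>
    intro i hi
    simp only [occ, List.mem_append] at hi
    rcases hi with hi | hi
    · by_cases h : x == e
      · simp only [h, if_true, List.mem_singleton] at hi
        subst hi; simp only [List.length_cons]; push_cast; omega
      · simp [h] at hi
    · have := ih (s + 1) i hi
      simp only [List.length_cons]
      push_cast at this ⊢
      omega

theorem occ_nodup (xs : List String) (s : Int) (e : String) : (occ xs s e).Nodup := by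
  induction xs generalizing s with
  | nil => simp [occ]
  | cons x xs ih =>
    simp only [occ]
    split
    · simp only [List.singleton_append, List.nodup_cons]
      refine ⟨fun h => ?_, ih (s + 1)⟩
      have := occ_bounds xs (s + 1) e s h
      omega
    · simpa using ih (s + 1)

theorem occ_length (xs : List String) (s : Int) (e : String) :
    (occ xs s e).length = xs.count e := by
  induction xs generalizing s with
  | nil => simp [occ]
  | cons x xs ih =>
    simp only [occ, List.length_append, List.count_cons, ih]
    by_cases h : x = e <;> simp [h, beq_iff_eq]
    omega

theorem occ_index?_eq (xs : List String) (s : Int) (e : String) (j : Nat) (hj : j < xs.length)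
    (he : xs[j] = e) :
    PySem.List.index? (occ xs s e) (s + (j : Int)) = some ((xs.take j).count e) := by
  induction xs generalizing s j with
  | nil => simp at hj
  | cons x xs ih =>
    cases j with
    | zero =>
      simp only [List.getElem_cons_zero] at he
      subst he
      simp only [occ, beq_self_eq_true, if_true, List.singleton_append, Nat.cast_zero,
        add_zero, List.take_zero, List.count_nil]
      exact PySem.List.index?_cons_self _ _
    | succ j =>
      have hj' : j < xs.length := by simpa using hj
      have hx : (x :: xs)[j + 1] = xs[j] := by simp
      rw [hx] at he
      have harg : s + ((j + 1 : Nat) : Int) = (s + 1) + (j : Int) := by push_cast; ring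
      by_cases h : x = e
      · subst h
        simp only [occ, beq_self_eq_true, if_true, List.singleton_append]
        rw [PySem.List.index?_cons_of_ne _ (by intro hc; omega : s ≠ s + ((j + 1 : Nat) : Int)),
          harg, ih (s + 1) j hj' he]
        simp
      · have hb : ¬ (x == e) = true := by simpa using h
        simp only [occ, hb, Bool.false_eq_true, if_false, List.nil_append]
        rw [harg, ih (s + 1) j hj' he]
        have : ¬ (x == e) = true := hb
        simp [List.count_cons, this]

theorem occ_not_mem (xs : List String) (s : Int) (e : String) (j : Nat) (hj : j < xs.length)
    (he : xs[j] ≠ e) : (s + (j : Int)) ∉ occ xs s e := by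
  induction xs generalizing s j with
  | nil => simp at hj
  | cons x xs ih =>
    cases j with
    | zero =>
      simp only [List.getElem_cons_zero] at he
      simp only [occ, List.mem_append]
      rintro (hmem | hmem)
      · have : ¬ (x == e) = true := by simpa using he
        simp [this] at hmem
      · have := occ_bounds xs (s + 1) e _ hmem
        omega
    | succ j =>
      have hj' : j < xs.length := by simpa using hj
      have hx : (x :: xs)[j + 1] = xs[j] := by simp
      rw [hx] at he
      have harg : s + ((j + 1 : Nat) : Int) = (s + 1) + (j : Int) := by push_cast; ring
      simp only [occ, List.mem_append]
      rintro (hmem | hmem)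
      · split at hmem <;> simp at hmem
        omega
      · rw [harg] at hmem
        exact ih (s + 1) j hj' he hmem

theorem occ_filter_eq (xs : List String) (s : Int) (e : String) :
    ((PySem.List.enumerate xs s).filter (fun p => p.2 == e)).map (fun p => p.1) = occ xs s e := by
  induction xs generalizing s with
  | nil => simp [occ, PySem.List.enumerate]
  | cons x xs ih =>
    simp only [PySem.List.enumerate_cons, List.filter_cons, occ]
    by_cases h : x = e <;> simp [h, ih]

-- pySetD at an in-range index is List.set
theorem pySetD_set (xs : List String) (i : Int) (v : String) (h0 : 0 ≤ i)
    (h : i.toNat < xs.length) : PySem.List.pySetD xs i v = xs.set i.toNat v := by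
  have hi : i < (xs.length : Int) := by omega
  simp [PySem.List.pySetD, PySem.List.pySet?, PySem.List.pyIdx?, h0, hi]

-- the inner scatter loop, characterised pointwise
theorem scatter_getElem? (e : String) (o : List Int) :
    ∀ (k : Int) (res : List String), o.Nodup →
    (∀ i ∈ o, 0 ≤ i ∧ i.toNat < res.length) →
    ((PySem.List.enumerate o k).foldl
        (fun res q => PySem.List.pySetD res q.2 (e ++ "-" ++ PySem.Int.toStr (q.1 + 1))) res).length
      = res.length ∧
    ∀ j : Nat,
      ((PySem.List.enumerate o k).foldl
        (fun res q => PySem.List.pySetD res q.2 (e ++ "-" ++ PySem.Int.toStr (q.1 + 1))) res)[j]?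
      = match PySem.List.index? o (j : Int) with
        | some r => some (e ++ "-" ++ PySem.Int.toStr (k + (r : Int) + 1))
        | none => res[j]? := by
  induction o with
  | nil =>
    intro k res _ _
    exact ⟨rfl, fun j => rfl⟩
  | cons i o ih =>
    intro k res hnd hrange
    have hi := hrange i (List.mem_cons_self ..)
    have hset : PySem.List.pySetD res i (e ++ "-" ++ PySem.Int.toStr (k + 1))
        = res.set i.toNat (e ++ "-" ++ PySem.Int.toStr (k + 1)) :=
      pySetD_set res i _ hi.1 hi.2
    have hnd' : o.Nodup := (List.nodup_cons.mp hnd).2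
    have hni : i ∉ o := (List.nodup_cons.mp hnd).1
    have hrange' : ∀ x ∈ o, 0 ≤ x ∧ x.toNat
        < (res.set i.toNat (e ++ "-" ++ PySem.Int.toStr (k + 1))).length := by
      intro x hx
      have := hrange x (List.mem_cons_of_mem _ hx)
      simpa [List.length_set] using this
    have step :
        (PySem.List.enumerate (i :: o) k).foldl
          (fun res q => PySem.List.pySetD res q.2 (e ++ "-" ++ PySem.Int.toStr (q.1 + 1))) res
        = (PySem.List.enumerate o (k + 1)).foldl
          (fun res q => PySem.List.pySetD res q.2 (e ++ "-" ++ PySem.Int.toStr (q.1 + 1)))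
          (res.set i.toNat (e ++ "-" ++ PySem.Int.toStr (k + 1))) := by
      rw [PySem.List.enumerate_cons]
      simp only [List.foldl_cons, hset]
    obtain ⟨ihlen, ihpt⟩ := ih (k + 1) (res.set i.toNat (e ++ "-" ++ PySem.Int.toStr (k + 1)))
      hnd' hrange'
    refine ⟨by rw [step, ihlen, List.length_set], fun j => ?_⟩
    rw [step, ihpt j]
    by_cases hij : i = (j : Int)
    · have hji : i.toNat = j := by omega
      have hnone : PySem.List.index? o (j : Int) = none :=
        (PySem.List.index?_eq_none_iff o _).mpr (by rw [← hij]; exact hni)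
      have hself : PySem.List.index? (i :: o) (j : Int) = some 0 := by
        rw [hij]; exact PySem.List.index?_cons_self _ _
      simp only [hnone, hself]
      rw [hji, List.getElem?_set_self (by simpa [hji] using hi.2)]
      simp
    · rw [PySem.List.index?_cons_of_ne _ hij]
      cases hidx : PySem.List.index? o (j : Int) with
      | none =>
        simp only [Option.map_none]
        have : i.toNat ≠ j := by omega
        rw [List.getElem?_set_ne this]
      | some r =>
        simp only [Option.map_some]
        have : k + 1 + (r : Int) + 1 = k + ((r + 1 : Nat) : Int) + 1 := by push_cast; ring
        rw [this]

-- one group's scatter, over the whole-list indices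
theorem group_getElem? (lista : List String) (e : String) (res : List String)
    (hlen : res.length = lista.length) (j : Nat) (hj : j < lista.length) :
    (((PySem.List.enumerate (occ lista 0 e) 0).foldl
        (fun res q => PySem.List.pySetD res q.2 (e ++ "-" ++ PySem.Int.toStr (q.1 + 1))) res)[j]?
      = if lista[j] = e
          then some (e ++ "-" ++ PySem.Int.toStr (0 + ((lista.take j).count e : Int) + 1))
          else res[j]?) := by
  have hb : ∀ i ∈ occ lista 0 e, 0 ≤ i ∧ i.toNat < res.length := by
    intro i hi
    have := occ_bounds lista 0 e i hi
    constructor <;> omega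
  obtain ⟨-, hpt⟩ := scatter_getElem? e (occ lista 0 e) 0 res (occ_nodup lista 0 e) hb
  rw [hpt j]
  by_cases he : lista[j] = e
  · have hidx := occ_index?_eq lista 0 e j hj he
    rw [zero_add] at hidx
    simp only [hidx, if_pos he]
  · have hmem := occ_not_mem lista 0 e j hj he
    rw [zero_add] at hmem
    have hnone := (PySem.List.index?_eq_none_iff (occ lista 0 e) _).mpr hmem
    simp only [hnone, if_neg he]

def gStep (lista : List String) (res : List String) (e : String) : List String :=
  if (occ lista 0 e).length > 1 then
    (PySem.List.enumerate (occ lista 0 e) 0).foldl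
      (fun res q => PySem.List.pySetD res q.2 (e ++ "-" ++ PySem.Int.toStr (q.1 + 1))) res
  else res

theorem outer_getElem? (lista : List String) :
    ∀ (ds : List String) (res : List String), res.length = lista.length →
    (ds.foldl (gStep lista) res).length = lista.length ∧
    ∀ j : Nat, (hj : j < lista.length) →
      (ds.foldl (gStep lista) res)[j]?
      = if lista[j] ∈ ds ∧ 1 < lista.count lista[j]
          then some (lista[j] ++ "-" ++ PySem.Int.toStr (0 + ((lista.take j).count lista[j] : Int) + 1))
          else res[j]? := by
  intro ds
  induction ds with
  | nil =>
    intro res hlen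
    refine ⟨hlen, fun j hj => ?_⟩
    simp
  | cons e ds ih =>
    intro res hlen
    simp only [List.foldl_cons]
    by_cases hgt : (occ lista 0 e).length > 1
    · have hstep : gStep lista res e
          = (PySem.List.enumerate (occ lista 0 e) 0).foldl
              (fun res q => PySem.List.pySetD res q.2 (e ++ "-" ++ PySem.Int.toStr (q.1 + 1)))
              res := by
        unfold gStep
        rw [if_pos hgt]
      have hb : ∀ i ∈ occ lista 0 e, 0 ≤ i ∧ i.toNat < res.length := by
        intro i hi
        have := occ_bounds lista 0 e i hi
        constructor <;> omega
      obtain ⟨hlen1, -⟩ := scatter_getElem? e (occ lista 0 e) 0 res (occ_nodup lista 0 e) hb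
      have hlen1' : (gStep lista res e).length = lista.length := by
        rw [hstep, hlen1, hlen]
      obtain ⟨hlenF, hptF⟩ := ih (gStep lista res e) hlen1'
      refine ⟨hlenF, fun j hj => ?_⟩
      rw [hptF j hj]
      have hcount : 1 < lista.count e := by
        rw [← occ_length lista 0 e]; omega
      have hgrp := group_getElem? lista e res hlen j hj
      rw [← hstep] at hgrp
      by_cases hmem : lista[j] ∈ ds ∧ 1 < lista.count lista[j]
      · rw [if_pos hmem, if_pos ⟨List.mem_cons_of_mem _ hmem.1, hmem.2⟩]
      · rw [if_neg hmem, hgrp]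
        by_cases he : lista[j] = e
        · rw [if_pos he, if_pos ⟨by rw [he]; exact List.mem_cons_self .., by rw [he]; exact hcount⟩, he]
        · rw [if_neg he]
          have : ¬ (lista[j] ∈ e :: ds ∧ 1 < lista.count lista[j]) := by
            rintro ⟨hm, hc⟩
            rcases List.mem_cons.mp hm with h | h
            · exact he h
            · exact hmem ⟨h, hc⟩
          rw [if_neg this]
    · have hstep : gStep lista res e = res := by
        unfold gStep
        rw [if_neg hgt]
      rw [hstep]
      obtain ⟨hlenF, hptF⟩ := ih res hlen
      refine ⟨hlenF, fun j hj => ?_⟩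
      rw [hptF j hj]
      have hcount : ¬ 1 < lista.count e := by
        rw [← occ_length lista 0 e]; omega
      by_cases he : lista[j] = e
      · have h1 : ¬ (lista[j] ∈ ds ∧ 1 < lista.count lista[j]) := by
          rintro ⟨-, hc⟩; rw [he] at hc; exact hcount hc
        have h2 : ¬ (lista[j] ∈ e :: ds ∧ 1 < lista.count lista[j]) := by
          rintro ⟨-, hc⟩; rw [he] at hc; exact hcount hc
        rw [if_neg h1, if_neg h2]
      · by_cases hmem : lista[j] ∈ ds ∧ 1 < lista.count lista[j]
        · rw [if_pos hmem, if_pos ⟨List.mem_cons_of_mem _ hmem.1, hmem.2⟩]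
        · have : ¬ (lista[j] ∈ e :: ds ∧ 1 < lista.count lista[j]) := by
            rintro ⟨hm, hc⟩
            rcases List.mem_cons.mp hm with h | h
            · exact he h
            · exact hmem ⟨h, hc⟩
          rw [if_neg hmem, if_neg this]

-- A's emission loop produces this list
def aSpec (lista : List String) : List String → List String → List String
  | _, [] => []
  | pref, e :: r =>
    (if 1 < lista.count e then e ++ "-" ++ PySem.Int.toStr ((pref.count e : Int) + 1) else e)
      :: aSpec lista (pref ++ [e]) r

theorem aSpec_length (lista : List String) :
    ∀ (rest pref : List String), (aSpec lista pref rest).length = rest.length := by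
  intro rest
  induction rest with
  | nil => intro pref; simp [aSpec]
  | cons e r ih => intro pref; simp [aSpec, ih]

theorem aSpec_getElem? (lista : List String) :
    ∀ (rest pref : List String) (j : Nat) (hj : j < rest.length),
    (aSpec lista pref rest)[j]?
      = some (if 1 < lista.count rest[j]
          then rest[j] ++ "-" ++ PySem.Int.toStr (((pref ++ rest.take j).count rest[j] : Int) + 1)
          else rest[j]) := by
  intro rest
  induction rest with
  | nil => intro pref j hj; simp at hj
  | cons e r ih =>
    intro pref j hj
    cases j with
    | zero => simp [aSpec]
    | succ j =>
      have hj' : j < r.length := by simpa using hj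
      simp only [aSpec, List.getElem?_cons_succ, List.getElem_cons_succ]
      rw [ih (pref ++ [e]) j hj']
      simp [List.append_assoc]

theorem a_loop (lista : List String) (total : PySem.Dict String Int)
    (htot : ∀ x, total.getD x 0 = (lista.count x : Int)) :
    ∀ (rest pref : List String) (ca : PySem.Dict String Int) (acc : List String),
    (∀ x, 1 < lista.count x → ca.getD x 0 = (pref.count x : Int)) →
    (rest.foldl
      (fun (st : PySem.Dict String Int × List String) elemento =>
        if total.getD elemento 0 > 1 then
          let ca := st.1.insert elemento (st.1.getD elemento 0 + 1)
          (ca, st.2 ++ [elemento ++ "-" ++ PySem.Int.toStr (ca.getD elemento 0)])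
        else
          (st.1, st.2 ++ [elemento])) (ca, acc)).2
    = acc ++ aSpec lista pref rest := by
  intro rest
  induction rest with
  | nil => intro pref ca acc _; simp [aSpec]
  | cons e r ih =>
    intro pref ca acc hinv
    simp only [List.foldl_cons]
    by_cases hc : total.getD e 0 > 1
    · have hcount : 1 < lista.count e := by
        have := htot e; omega
      rw [if_pos hc]
      have hgd : (ca.insert e (ca.getD e 0 + 1)).getD e 0 = (pref.count e : Int) + 1 := by
        rw [PySem.Dict.getD_insert_self, hinv e hcount]
      have hinv' : ∀ x, 1 < lista.count x →
          (ca.insert e (ca.getD e 0 + 1)).getD x 0 = ((pref ++ [e]).count x : Int) := by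
        intro x hx
        by_cases hxe : x = e
        · subst hxe
          rw [PySem.Dict.getD_insert_self, hinv x hx]
          simp [List.count_append]
        · rw [PySem.Dict.getD_insert_of_ne ca _ _ hxe, hinv x hx]
          have : ¬ (e == x) = true := by simpa using fun hc' => hxe hc'.symm
          simp [List.count_append, List.count_singleton, this]
      rw [ih (pref ++ [e]) _ _ hinv']
      rw [show aSpec lista pref (e :: r)
          = (e ++ "-" ++ PySem.Int.toStr ((pref.count e : Int) + 1)) :: aSpec lista (pref ++ [e]) r by
        simp [aSpec, hcount]]
      rw [hgd]
      simp
    · have hcount : ¬ 1 < lista.count e := by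
        have := htot e; omega
      rw [if_neg hc]
      have hinv' : ∀ x, 1 < lista.count x →
          ca.getD x 0 = ((pref ++ [e]).count x : Int) := by
        intro x hx
        have hxe : ¬ (e == x) = true := by
          simp only [beq_iff_eq]
          intro heq; subst heq; exact hcount hx
        rw [hinv x hx]
        simp [List.count_append, List.count_singleton, hxe]
      rw [ih (pref ++ [e]) _ _ hinv']
      rw [show aSpec lista pref (e :: r) = e :: aSpec lista (pref ++ [e]) r by
        simp [aSpec, hcount]]
      simp

-- the index table B builds, characterised: lookups, keys, items
theorem pos_getD (lista : List String) (e : String) :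
    ((PySem.List.enumerate lista 0).foldl
      (fun d p => d.modify p.2 [] (fun l => l ++ [p.1])) PySem.Dict.empty).getD e []
    = occ lista 0 e := by
  have key := PySem.Dict.getD_foldl_modify_append
    ((PySem.List.enumerate lista 0).map (fun p => (p.2, p.1))) PySem.Dict.empty e
  rw [List.foldl_map] at key
  refine Eq.trans ?_ (Eq.trans key ?_)
  · rfl
  · rw [List.filter_map, List.map_map]
    refine Eq.trans ?_ (occ_filter_eq lista 0 e)
    rfl

theorem pos_nodup (lista : List String) :
    ((PySem.List.enumerate lista 0).foldl
      (fun d p => d.modify p.2 [] (fun l => l ++ [p.1])) PySem.Dict.empty).keys.Nodup :=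
  PySem.Dict.nodup_keys_foldl_modify_key (PySem.List.enumerate lista 0)
    (fun p => p.2) [] (fun _ p => fun l => l ++ [p.1]) PySem.Dict.empty
    (by rw [PySem.Dict.keys_empty]; exact List.nodup_nil)

theorem pos_keys (lista : List String) :
    ((PySem.List.enumerate lista 0).foldl
      (fun d p => d.modify p.2 [] (fun l => l ++ [p.1])) PySem.Dict.empty).keys
    = PySem.Set.ofList lista := by
  have key := PySem.Dict.keys_foldl_modify_key (PySem.List.enumerate lista 0)
    (fun p => p.2) [] (fun _ p => fun l => l ++ [p.1]) PySem.Dict.empty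
  refine Eq.trans key ?_
  rw [PySem.Dict.keys_empty, PySem.List.map_snd_enumerate, PySem.Set.update_nil_left]

theorem pos_items (lista : List String) :
    ((PySem.List.enumerate lista 0).foldl
      (fun d p => d.modify p.2 [] (fun l => l ++ [p.1])) PySem.Dict.empty).items
    = (PySem.Set.ofList lista).map (fun e => (e, occ lista 0 e)) := by
  rw [PySem.Dict.items_eq_map_keys _ (pos_nodup lista) [], pos_keys lista]
  exact List.map_congr_left (fun e _ => by rw [pos_getD lista e])

-- ===== VERDICT (by name: the statement is the Claim_ definition above) =====
theorem enumerate_repeated_from_startup_spec : Claim_equal_enumerate_repeated_from_startup := by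
  intro lista _
  unfold Spec_enumerate_repeated_from_startup
  have htot : ∀ x, (lista.foldl (fun d e => d.insert e (d.getD e 0 + 1))
      PySem.Dict.empty).getD x 0 = (lista.count x : Int) := by
    intro x
    rw [PySem.Dict.getD_foldl_insert_add_one]
    simp [PySem.Dict.getD_empty]
  have hA : enumerate_repeated_from_startup lista = aSpec lista [] lista := by
    have h0 : ∀ x, 1 < lista.count x →
        (PySem.Dict.empty : PySem.Dict String Int).getD x 0
          = (List.count x ([] : List String) : Int) := by
      intro x _; simp [PySem.Dict.getD_empty]
    have key := a_loop lista _ htot lista [] PySem.Dict.empty [] h0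
    simpa [enumerate_repeated_from_startup] using key
  have hB : enumerate_repeated_from_startup_alt lista
      = (PySem.Set.ofList lista).foldl (gStep lista) lista := by
    simp only [enumerate_repeated_from_startup_alt]
    rw [pos_items lista, List.foldl_map]
    rfl
  obtain ⟨hlenB, hptB⟩ := outer_getElem? lista (PySem.Set.ofList lista) lista rfl
  rw [hA, hB]
  apply List.ext_getElem?
  intro i
  by_cases hi : i < lista.length
  · rw [aSpec_getElem? lista lista [] i hi, hptB i hi]
    have hmem : lista[i] ∈ PySem.Set.ofList lista :=
      (PySem.Set.mem_ofList lista lista[i]).mpr (lista.getElem_mem hi)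
    by_cases hc : 1 < lista.count lista[i]
    · rw [if_pos hc, if_pos ⟨hmem, hc⟩]
      have harith : ((List.count lista[i] (([] : List String) ++ lista.take i) : Nat) : Int) + 1
          = 0 + ((List.count lista[i] (lista.take i) : Nat) : Int) + 1 := by
        simp
      rw [harith]
    · rw [if_neg hc, if_neg (fun h => hc h.2), List.getElem?_eq_getElem hi]
  · have h1 : (aSpec lista [] lista).length ≤ i := by rw [aSpec_length]; omega
    have h2 : ((PySem.Set.ofList lista).foldl (gStep lista) lista).length ≤ i := by
      rw [hlenB]; omega
    rw [List.getElem?_eq_none h1, List.getElem?_eq_none h2]
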